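-- pv_equiv track=rewrite | github.com/timothysyquah/Toolbox | Daniel_Phase_Diagram_Tool/Implimentation_Dataset/make_dat_file.py | obtain_unique_dims
-- ===== SOURCE A (Python) =====
-- def obtain_unique_dims(dictionary):
--
--     keys = list(dictionary)
--     var = len(keys[0])
--     returnlist = []
--     for i in range(0,var,1):
--         temp = []
--
--         for key in keys:
--
--             temp.append(key[i])
--         returnlist.append(sorted(list(set(temp))))
--     return returnlist
-- ===== SOURCE B (Python) =====
-- def _insort_unique(lst, x):
--     # insert x into the sorted duplicate-free list lst, keeping it sorted; no-op if present
--     j = 0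
--     while j < len(lst):
--         if x < lst[j]:
--             return lst[:j] + [x] + lst[j:]
--         if x == lst[j]:
--             return lst
--         j += 1
--     return lst + [x]
--
-- def obtain_unique_dims(dictionary):
--     keys = list(dictionary)
--     var = len(keys[0])
--     result = [[] for _ in range(var)]
--     for key in keys:
--         for i in range(var):
--             result[i] = _insort_unique(result[i], key[i])
--     return result
-- ===== Notes on version B (the rewrite author's own statement) =====
-- stated objective: alternative
-- what changed: Replaces A's per-dimension gather/set-dedupe/sort pipeline with a single pass over the keys that maintains one sorted duplicate-free list per dimension by ordered insertion (no set(), no sorted() call).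
import Mathlib
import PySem

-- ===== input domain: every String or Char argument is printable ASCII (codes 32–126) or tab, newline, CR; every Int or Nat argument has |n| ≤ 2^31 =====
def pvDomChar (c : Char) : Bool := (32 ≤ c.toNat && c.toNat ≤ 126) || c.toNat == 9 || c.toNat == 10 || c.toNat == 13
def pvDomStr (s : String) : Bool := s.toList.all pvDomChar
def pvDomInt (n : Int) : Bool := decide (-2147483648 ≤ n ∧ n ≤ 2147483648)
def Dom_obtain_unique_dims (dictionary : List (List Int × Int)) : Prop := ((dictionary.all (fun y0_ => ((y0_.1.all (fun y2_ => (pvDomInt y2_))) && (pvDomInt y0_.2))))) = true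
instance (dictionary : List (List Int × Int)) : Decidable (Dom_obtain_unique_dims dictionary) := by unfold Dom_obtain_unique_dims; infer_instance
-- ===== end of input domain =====

-- B replaces A's gather/set-dedupe/sort pipeline by a single pass over the keys that maintains
-- one sorted duplicate-free list per dimension via ordered insertion (objective: alternative).

-- ===== PORT A =====
-- A: for each dimension i, scan all keys collecting key[i], then sorted(list(set(temp))).
def obtain_unique_dims (dictionary : List (List Int × Int)) : List (List Int) :=
  let keys := PySem.List.dedup (dictionary.map Prod.fst)
  let var := (PySem.List.pyGetD keys 0 []).length
  (PySem.List.pyRange 0 var 1).foldl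
    (fun returnlist i =>
      let temp := keys.foldl (fun temp key => temp ++ [PySem.List.pyGetD key i 0]) []
      returnlist ++ [PySem.List.sorted (PySem.Set.ofList temp) (fun x => x) false]) []

-- ===== PORT B =====
-- B's helper _insort_unique: while-loop over j, early returns; lst[:j]+[x]+lst[j:] is
-- take/drop since j ≥ 0 (exact for a nonnegative in-range index).
def insortLoop (lst : List Int) (x : Int) (j : Nat) : List Int :=
  if h : j < lst.length then
    if x < lst[j] then lst.take j ++ x :: lst.drop j
    else if x = lst[j] then lst
    else insortLoop lst x (j + 1)
  else lst ++ [x]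
termination_by lst.length - j

def insortUnique (lst : List Int) (x : Int) : List Int := insortLoop lst x 0

-- B: one pass over the keys, updating result[i] by ordered insertion; no argument is mutated.
def obtain_unique_dims_alt (dictionary : List (List Int × Int)) : List (List Int) :=
  let keys := PySem.List.dedup (dictionary.map Prod.fst)
  let var := (PySem.List.pyGetD keys 0 []).length
  keys.foldl
    (fun res key =>
      (PySem.List.pyRange 0 var 1).foldl
        (fun res i =>
          PySem.List.pySetD res i
            (insortUnique (PySem.List.pyGetD res i []) (PySem.List.pyGetD key i 0)))
        res)
    ((PySem.List.pyRange 0 var 1).map (fun _ => ([] : List Int)))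

-- ===== PRECONDITION & SPEC =====
-- Pre_ excludes exactly the inputs where Python A raises IndexError: the empty dict
-- (keys[0]) and dicts containing a key shorter than the first key (key[i]).
def Pre_obtain_unique_dims (dictionary : List (List Int × Int)) : Prop :=
  dictionary ≠ [] ∧ ∀ p ∈ dictionary, (dictionary.headI.1).length ≤ p.1.length
instance (dictionary : List (List Int × Int)) : Decidable (Pre_obtain_unique_dims dictionary) := by unfold Pre_obtain_unique_dims; infer_instance
def pvWitness_obtain_unique_dims : (List (List Int × Int)) := [([1, 2], 5), ([0, 2], 7)]
def Spec_obtain_unique_dims (dictionary : List (List Int × Int)) (out : List (List Int)) : Prop := out = obtain_unique_dims_alt dictionary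
instance (dictionary : List (List Int × Int)) (out : List (List Int)) : Decidable (Spec_obtain_unique_dims dictionary out) := by unfold Spec_obtain_unique_dims; infer_instance

-- ===== CLAIM (what is proved, stated in full; the proofs are below) =====
def Claim_equal_obtain_unique_dims : Prop := ∀ (dictionary : List (List Int × Int)), Dom_obtain_unique_dims dictionary → Pre_obtain_unique_dims dictionary → Spec_obtain_unique_dims dictionary (obtain_unique_dims dictionary)

-- ===== LEMMAS AND PROOFS =====

-- structural (cons-recursion) form of the insertion helper, for the proofs
def insortR : List Int → Int → List Int
  | [], x => [x]
  | v :: t, x => if x < v then x :: v :: t else if x = v then v :: t else v :: insortR t x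

theorem insortLoop_eq (lst : List Int) (x : Int) (j : Nat) (hj : j ≤ lst.length) :
    insortLoop lst x j = lst.take j ++ insortR (lst.drop j) x := by
  induction hn : lst.length - j generalizing j with
  | zero =>
    have hj' : j = lst.length := by omega
    rw [insortLoop]
    simp [hj', insortR]
  | succ n ih =>
    have h : j < lst.length := by omega
    rw [insortLoop, dif_pos h]
    have hdrop : lst.drop j = lst[j] :: lst.drop (j + 1) := List.drop_eq_getElem_cons h
    by_cases h1 : x < lst[j]
    · rw [if_pos h1, hdrop]
      simp [insortR, h1]
    · by_cases h2 : x = lst[j]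
      · rw [if_neg h1, if_pos h2, hdrop]
        simp only [insortR, if_neg h1, if_pos h2]
        rw [← hdrop, List.take_append_drop]
      · rw [if_neg h1, if_neg h2, ih (j + 1) (by omega) (by omega), hdrop]
        simp only [insortR, if_neg h1, if_neg h2]
        rw [← List.take_concat_get]
        · simp
        · exact h

theorem insortUnique_eq (lst : List Int) (x : Int) : insortUnique lst x = insortR lst x := by
  rw [insortUnique, insortLoop_eq lst x 0 (by omega)]
  simp

theorem mem_insortR (l : List Int) (x y : Int) : y ∈ insortR l x ↔ y = x ∨ y ∈ l := by
  induction l with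
  | nil => simp [insortR]
  | cons v t ih =>
    by_cases h1 : x < v
    · simp only [insortR, if_pos h1, List.mem_cons]
    · by_cases h2 : x = v
      · subst h2
        simp [insortR, List.mem_cons]
      · simp only [insortR, if_neg h1, if_neg h2, List.mem_cons, ih]
        tauto

theorem pairwise_insortR (l : List Int) (x : Int) (hl : l.Pairwise (· < ·)) :
    (insortR l x).Pairwise (· < ·) := by
  induction l with
  | nil => simp [insortR]
  | cons v t ih =>
    rw [List.pairwise_cons] at hl
    by_cases h1 : x < v
    · rw [insortR, if_pos h1, List.pairwise_cons]
      refine ⟨?_, List.pairwise_cons.2 hl⟩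
      intro a ha
      rcases List.mem_cons.1 ha with rfl | ha
      · exact h1
      · exact lt_trans h1 (hl.1 a ha)
    · by_cases h2 : x = v
      · rw [insortR, if_neg h1, if_pos h2, List.pairwise_cons]; exact hl
      · rw [insortR, if_neg h1, if_neg h2, List.pairwise_cons]
        refine ⟨?_, ih hl.2⟩
        intro a ha
        rcases (mem_insortR t x a).1 ha with rfl | ha
        · omega
        · exact hl.1 a ha

theorem insortR_of_mem (l : List Int) (x : Int) (hl : l.Pairwise (· < ·)) (hx : x ∈ l) :
    insortR l x = l := by
  induction l with
  | nil => simp at hx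
  | cons v t ih =>
    rw [List.pairwise_cons] at hl
    rcases List.mem_cons.1 hx with rfl | hx
    · simp [insortR]
    · have hvx : v < x := hl.1 x hx
      rw [insortR, if_neg (by omega), if_neg (by omega), ih hl.2 hx]

theorem insortR_perm_of_not_mem (l : List Int) (x : Int) (hx : x ∉ l) :
    (insortR l x).Perm (x :: l) := by
  induction l with
  | nil => simp [insortR]
  | cons v t ih =>
    have hxv : x ≠ v := fun h => hx (h ▸ List.mem_cons_self)
    by_cases h1 : x < v
    · rw [insortR, if_pos h1]
    · rw [insortR, if_neg h1, if_neg hxv]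
      exact ((ih (fun h => hx (List.mem_cons_of_mem v h))).cons v).trans (List.Perm.swap x v t)

-- the running bucket of dimension j after folding the keys ks, starting from s
def pvColI (ks : List (List Int)) (j : Int) (s : List Int) : List Int :=
  ks.foldl (fun s k => insortUnique s (PySem.List.pyGetD k j 0)) s

-- the fold of B's buckets equals the fold of A's set-builder, as a permutation, staying sorted
theorem pv_fold_perm (c : List Int) (s t : List Int)
    (hs : s.Pairwise (· < ·)) (hperm : s.Perm t) :
    ((c.foldl insortUnique s).Pairwise (· < ·)) ∧
      (c.foldl insortUnique s).Perm (c.foldl PySem.Set.add t) := by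
  induction c generalizing s t with
  | nil => exact ⟨hs, hperm⟩
  | cons x c ih =>
    simp only [List.foldl_cons]
    have hmem : x ∈ s ↔ x ∈ t := ⟨fun h => hperm.mem_iff.1 h, fun h => hperm.mem_iff.2 h⟩
    have hadd : PySem.Set.add t x = if x ∈ t then t else t ++ [x] := by
      simp [PySem.Set.add, PySem.Set.contains]
    rw [insortUnique_eq]
    by_cases hx : x ∈ s
    · rw [insortR_of_mem s x hs hx]
      have : PySem.Set.add t x = t := by rw [hadd, if_pos (hmem.1 hx)]
      rw [this]
      exact ih s t hs hperm
    · have hp : (insortR s x).Perm (x :: s) := insortR_perm_of_not_mem s x hx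
      have hq : (x :: s).Perm (PySem.Set.add t x) := by
        rw [hadd, if_neg (fun h => hx (hmem.2 h))]
        exact (hperm.cons x).trans (List.perm_append_singleton x t).symm
      exact ih _ _ (pairwise_insortR s x hs) (hp.trans hq)

-- ===== the per-column equality =====
theorem pv_column (c : List Int) :
    PySem.List.sorted (PySem.Set.ofList c) (fun x => x) false = c.foldl insortUnique [] := by
  have h := pv_fold_perm c [] [] (by simp) (List.Perm.refl [])
  rw [PySem.Set.ofList_eq_foldl]
  exact PySem.List.sorted_eq_of_perm_of_pairwise_lt _ _ _ h.2 h.1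

-- buckets kept in map form: setting one cell of a range-map
theorem pv_set_map_pyRange {α : Type} (G : Int → α) (n m : Nat) (v : α) (_hm : m < n) :
    ((PySem.List.pyRange 0 (n : Int) 1).map G).set m v
      = (PySem.List.pyRange 0 (n : Int) 1).map (fun j => if j = (m : Int) then v else G j) := by
  apply List.ext_getElem?
  intro k
  by_cases hk : k < n
  · rw [List.getElem?_set]
    rw [PySem.List.getElem?_map_pyRange_zero _ _ _ hk, PySem.List.getElem?_map_pyRange_zero _ _ _ hk]
    by_cases hkm : m = k
    · simp [hkm, hk]
    · have : ¬ ((k : Int) = (m : Int)) := by omega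
      simp [hkm, this]
  · have h1 : (((PySem.List.pyRange 0 (n : Int) 1).map G).set m v).length = n := by
      simp [PySem.List.length_pyRange_one]
    have h2 : ((PySem.List.pyRange 0 (n : Int) 1).map
        (fun j => if j = (m : Int) then v else G j)).length = n := by
      simp [PySem.List.length_pyRange_one]
    rw [List.getElem?_eq_none (by omega), List.getElem?_eq_none (by omega)]

-- one key's inner loop 'for i in range(m): result[i] = _insort_unique(result[i], key[i])'
theorem pv_inner (key : List Int) (n : Nat) (F : Int → List Int) (m : Nat) (hm : m ≤ n) :
    (PySem.List.pyRange 0 (m : Int) 1).foldl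
        (fun bs i =>
          PySem.List.pySetD bs i
            (insortUnique (PySem.List.pyGetD bs i []) (PySem.List.pyGetD key i 0)))
        ((PySem.List.pyRange 0 (n : Int) 1).map F)
      = (PySem.List.pyRange 0 (n : Int) 1).map
          (fun j => if j < (m : Int) then insortUnique (F j) (PySem.List.pyGetD key j 0) else F j) := by
  induction m with
  | zero =>
    have h0 : PySem.List.pyRange 0 ((0 : Nat) : Int) 1 = [] := by decide
    rw [h0, List.foldl_nil]
    refine (List.map_congr_left ?_).symm
    intro j hj
    have hmem := (PySem.List.mem_pyRange_one).1 hj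
    simp only [ite_eq_right_iff]
    intro h
    exact absurd h (by omega)
  | succ m ih =>
    have hcast : ((m + 1 : Nat) : Int) = (m : Int) + 1 := by omega
    rw [hcast, PySem.List.pyRange_one_succ_right (by omega), List.foldl_append,
      ih (by omega), List.foldl_cons, List.foldl_nil]
    have hget : PySem.List.pyGetD ((PySem.List.pyRange 0 (n : Int) 1).map
        (fun j => if j < (m : Int) then insortUnique (F j) (PySem.List.pyGetD key j 0) else F j))
        (m : Int) [] = F m := by
      rw [PySem.List.pyGetD_map_pyRange_of_nonneg _ _ _ _ (by omega) (by omega)]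
      simp
    rw [hget, PySem.List.pySetD_natCast, pv_set_map_pyRange _ n m _ (by omega)]
    refine List.map_congr_left ?_
    intro j hj
    have := (PySem.List.mem_pyRange_one).1 hj
    by_cases h1 : j = (m : Int)
    · simp [h1]
    · by_cases h2 : j < (m : Int)
      · simp [h1, h2, show j < (m : Int) + 1 by omega]
      · simp [h1, h2, show ¬ (j < (m : Int) + 1) by omega]

-- the whole pass over the keys, buckets kept in map form
theorem pv_fold_buckets (ks : List (List Int)) (n : Nat) (F : Int → List Int) :
    ks.foldl
        (fun bs key =>
          (PySem.List.pyRange 0 (n : Int) 1).foldl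
            (fun bs i =>
              PySem.List.pySetD bs i
                (insortUnique (PySem.List.pyGetD bs i []) (PySem.List.pyGetD key i 0)))
            bs)
        ((PySem.List.pyRange 0 (n : Int) 1).map F)
      = (PySem.List.pyRange 0 (n : Int) 1).map (fun j => pvColI ks j (F j)) := by
  induction ks generalizing F with
  | nil => simp [pvColI]
  | cons k t ih =>
    simp only [List.foldl_cons]
    rw [pv_inner k n F n le_rfl]
    have hstep : (PySem.List.pyRange 0 (n : Int) 1).map
        (fun j => if j < (n : Int) then insortUnique (F j) (PySem.List.pyGetD k j 0) else F j)
        = (PySem.List.pyRange 0 (n : Int) 1).map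
          (fun j => insortUnique (F j) (PySem.List.pyGetD k j 0)) := by
      refine List.map_congr_left ?_
      intro j hj
      have := (PySem.List.mem_pyRange_one).1 hj
      simp [show j < (n : Int) from by omega]
    rw [hstep, ih]
    rfl

-- ===== VERDICT (by name: the statement is the Claim_ definition above) =====
theorem obtain_unique_dims_spec : Claim_equal_obtain_unique_dims := by
  intro dictionary _ _
  unfold Spec_obtain_unique_dims obtain_unique_dims obtain_unique_dims_alt
  dsimp only
  rw [pv_fold_buckets, PySem.List.foldl_append_singleton_eq_map, List.nil_append]
  refine List.map_congr_left ?_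
  intro i _
  rw [PySem.List.foldl_append_singleton_eq_map, List.nil_append, pv_column, List.foldl_map]
  rfl
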